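-- pv_equiv track=rewrite | github.com/mynlp/optimal-strategy | utils.py | calc_parsing_scores
-- ===== SOURCE A (Python) =====
-- from typing import Any, TypeAlias
--
-- def calc_parsing_scores(
--     pred_spans: dict[Any, int],
--     gold_spans: dict[Any, int],
-- ) -> tuple[float, float, float]:
--     tp = sum([min(pred_spans[span], gold_spans[span]) for span in gold_spans if span in pred_spans] + [0])
--     num_pred_spans = sum(pred_spans.values())
--     num_gold_spans = sum(gold_spans.values())
--     fp = num_pred_spans - tp
--     fn = num_gold_spans - tp
--
--     return tp, fp, fn
-- ===== SOURCE B (Python) =====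
-- def calc_parsing_scores(pred_spans, gold_spans):
--     # One pass over pred items with running tp/fp/fn accumulators,
--     # plus a sweep over gold-only spans; no totals, no subtraction of sums.
--     tp = 0
--     fp = 0
--     fn = 0
--     for span, p in pred_spans.items():
--         g = gold_spans.get(span)
--         if g is None:
--             fp += p
--         else:
--             m = min(p, g)
--             tp += m
--             fp += p - m
--             fn += g - m
--     for span, g in gold_spans.items():
--         if span not in pred_spans:
--             fn += g
--     return tp, fp, fn
-- ===== Notes on version B (the rewrite author's own statement) =====
-- stated objective: alternative
-- what changed: Instead of one comprehension-sum over matched gold spans plus two value-total sums and two subtractions, B keeps running tp/fp/fn accumulators in a single pass over pred items (with a gold lookup per item) plus a sweep over gold-only spans, never computing the value totals.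
import Mathlib
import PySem

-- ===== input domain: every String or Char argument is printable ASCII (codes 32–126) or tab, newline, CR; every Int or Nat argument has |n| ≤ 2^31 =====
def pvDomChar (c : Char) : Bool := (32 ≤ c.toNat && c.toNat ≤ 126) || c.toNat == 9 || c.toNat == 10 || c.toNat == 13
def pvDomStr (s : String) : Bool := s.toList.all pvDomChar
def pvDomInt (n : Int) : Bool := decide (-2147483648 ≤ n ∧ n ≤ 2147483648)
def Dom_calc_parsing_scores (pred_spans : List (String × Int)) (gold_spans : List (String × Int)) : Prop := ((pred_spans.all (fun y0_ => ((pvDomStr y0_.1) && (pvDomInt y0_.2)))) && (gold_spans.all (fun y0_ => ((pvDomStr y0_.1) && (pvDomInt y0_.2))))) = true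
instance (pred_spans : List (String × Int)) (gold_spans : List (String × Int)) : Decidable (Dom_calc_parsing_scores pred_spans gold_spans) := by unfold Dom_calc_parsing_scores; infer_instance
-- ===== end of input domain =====

-- B replaces A's matched-sum plus two value totals and subtractions by running
-- tp/fp/fn accumulators over pred items and a gold-only sweep (objective: alternative decomposition).

-- ===== PORT A =====
def calc_parsing_scores (pred_spans : List (String × Int)) (gold_spans : List (String × Int)) : Int × Int × Int :=
  let dp := PySem.Dict.ofList pred_spans
  let dg := PySem.Dict.ofList gold_spans
  let tp := (((dg.keys.filter (fun span => dp.contains span)).map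
      (fun span => min (dp.getD span 0) (dg.getD span 0))) ++ [0]).sum
  let num_pred_spans := dp.values.sum
  let num_gold_spans := dg.values.sum
  let fp := num_pred_spans - tp
  let fn := num_gold_spans - tp
  (tp, fp, fn)

-- ===== PORT B =====
-- body of B's first loop: one pred item updates the (tp, fp, fn) accumulator
def pvAltStep (dg : PySem.Dict String Int) (acc : Int × Int × Int) (x : String × Int) : Int × Int × Int :=
  match dg.get? x.1 with
  | none => (acc.1, acc.2.1 + x.2, acc.2.2)
  | some g =>
    let m := min x.2 g
    (acc.1 + m, acc.2.1 + (x.2 - m), acc.2.2 + (g - m))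

def calc_parsing_scores_alt (pred_spans : List (String × Int)) (gold_spans : List (String × Int)) : Int × Int × Int :=
  let dp := PySem.Dict.ofList pred_spans
  let dg := PySem.Dict.ofList gold_spans
  let acc := dp.items.foldl (pvAltStep dg) (0, 0, 0)
  let fn := dg.items.foldl (fun fn y => if dp.contains y.1 then fn else fn + y.2) acc.2.2
  (acc.1, acc.2.1, fn)

-- ===== PRECONDITION & SPEC =====
def Spec_calc_parsing_scores (pred_spans : List (String × Int)) (gold_spans : List (String × Int)) (out : Int × Int × Int) : Prop := out = calc_parsing_scores_alt pred_spans gold_spans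
instance (pred_spans : List (String × Int)) (gold_spans : List (String × Int)) (out : Int × Int × Int) : Decidable (Spec_calc_parsing_scores pred_spans gold_spans out) := by unfold Spec_calc_parsing_scores; infer_instance

-- ===== CLAIM (what is proved, stated in full; the proofs are below) =====
def Claim_equal_calc_parsing_scores : Prop := ∀ (pred_spans : List (String × Int)) (gold_spans : List (String × Int)), Dom_calc_parsing_scores pred_spans gold_spans → Spec_calc_parsing_scores pred_spans gold_spans (calc_parsing_scores pred_spans gold_spans)

-- ===== LEMMAS AND PROOFS =====

-- per-item contributions of B's first loop
def pvT (dg : PySem.Dict String Int) (x : String × Int) : Int :=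
  match dg.get? x.1 with | none => 0 | some g => min x.2 g
def pvU (dg : PySem.Dict String Int) (x : String × Int) : Int :=
  match dg.get? x.1 with | none => x.2 | some g => x.2 - min x.2 g
def pvV (dg : PySem.Dict String Int) (x : String × Int) : Int :=
  match dg.get? x.1 with | none => 0 | some g => g - min x.2 g

theorem pv_foldl_triple (dg : PySem.Dict String Int) (l : List (String × Int)) (acc : Int × Int × Int) :
    l.foldl (pvAltStep dg) acc =
      (acc.1 + (l.map (pvT dg)).sum, acc.2.1 + (l.map (pvU dg)).sum, acc.2.2 + (l.map (pvV dg)).sum) := by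
  induction l generalizing acc with
  | nil => simp
  | cons x xs ih =>
    cases h : dg.get? x.1 with
    | none =>
      simp only [List.foldl_cons, List.map_cons, List.sum_cons, ih, pvAltStep, pvT, pvU, pvV, h]
      refine Prod.ext (by ring) (Prod.ext (by ring) (by ring))
    | some g =>
      simp only [List.foldl_cons, List.map_cons, List.sum_cons, ih, pvAltStep, pvT, pvU, pvV, h]
      refine Prod.ext (by ring) (Prod.ext (by ring) (by ring))

theorem pv_foldl_fn (dp : PySem.Dict String Int) (l : List (String × Int)) (c : Int) :
    l.foldl (fun fn y => if dp.contains y.1 then fn else fn + y.2) c =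
      c + ((l.filter (fun y => !dp.contains y.1)).map (·.2)).sum := by
  induction l generalizing c with
  | nil => simp
  | cons x xs ih =>
    by_cases h : dp.contains x.1 <;> simp [ih, h]
    ring

theorem pv_sum_map_sub {α : Type} (l : List α) (f g : α → Int) :
    (l.map (fun x => f x - g x)).sum = (l.map f).sum - (l.map g).sum := by
  induction l with
  | nil => simp
  | cons x xs ih => simp [ih]; ring

theorem pv_sum_ite_filter {α : Type} (l : List α) (c : α → Bool) (f : α → Int) :
    (l.map (fun x => if c x then f x else 0)).sum = ((l.filter c).map f).sum := by
  induction l with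
  | nil => simp
  | cons x xs ih => by_cases h : c x <;> simp [h, ih]

theorem pv_sum_filter_split {α : Type} (l : List α) (c : α → Bool) (f : α → Int) :
    ((l.filter c).map f).sum + ((l.filter (fun x => !c x)).map f).sum = (l.map f).sum := by
  induction l with
  | nil => simp
  | cons x xs ih => by_cases h : c x <;> simp [h, ← ih] <;> ring

theorem pv_map_fst_filter {α β : Type} (l : List (α × β)) (p : α → Bool) :
    (l.filter (fun y => p y.1)).map (·.1) = (l.map (·.1)).filter p := by
  induction l with
  | nil => rfl
  | cons x xs ih => by_cases h : p x.1 <;> simp [h, ih]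

-- items-sums become keys-sums on a nodup-keyed dict
theorem pv_items_sum_to_keys (d : PySem.Dict String Int) (hn : d.keys.Nodup)
    (f : String × Int → Int) (F : String → Int)
    (hF : ∀ s, F s = f (s, d.getD s 0)) :
    (d.items.map f).sum = (d.keys.map F).sum := by
  have h1 : d.items.map f = d.items.map (fun x => F x.1) := by
    apply List.map_congr_left
    rintro ⟨k, v⟩ hx
    have hv : d.getD k 0 = v := PySem.Dict.getD_of_mem_items d hx hn 0
    rw [hF k, hv]
  rw [h1]
  have : d.keys = d.items.map (·.1) := by simp only [PySem.Dict.keys]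
  rw [this, List.map_map]
  rfl

theorem pv_perm_common (dp dg : PySem.Dict String Int) (hp : dp.keys.Nodup) (hg : dg.keys.Nodup) :
    (dp.keys.filter (fun s => dg.contains s)).Perm (dg.keys.filter (fun s => dp.contains s)) := by
  apply (List.perm_ext_iff_of_nodup (hp.filter _) (hg.filter _)).mpr
  intro s
  simp only [List.mem_filter, PySem.Dict.contains_iff_mem_keys]
  tauto

-- ===== VERDICT (by name: the statement is the Claim_ definition above) =====
theorem calc_parsing_scores_spec : Claim_equal_calc_parsing_scores := by
  intro pred_spans gold_spans _
  unfold Spec_calc_parsing_scores calc_parsing_scores calc_parsing_scores_alt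
  dsimp only
  set dp := PySem.Dict.ofList pred_spans with hdp
  set dg := PySem.Dict.ofList gold_spans with hdg
  have hnp : dp.keys.Nodup := PySem.Dict.nodup_keys_ofList _
  have hng : dg.keys.Nodup := PySem.Dict.nodup_keys_ofList _
  -- per-key forms of the loop contributions
  have hT : ∀ s, pvT dg (s, dp.getD s 0) =
      if dg.contains s then min (dp.getD s 0) (dg.getD s 0) else 0 := by
    intro s
    cases h : dg.get? s with
    | none =>
      have hc : dg.contains s = false := by rw [PySem.Dict.contains_eq_isSome_get?, h]; rfl
      simp [pvT, h, hc]
    | some g =>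
      have hc : dg.contains s = true := by rw [PySem.Dict.contains_eq_isSome_get?, h]; rfl
      have hgd : dg.getD s 0 = g := PySem.Dict.getD_of_get?_eq_some dg 0 h
      simp [pvT, h, hc, hgd]
  have hTsum : (dp.items.map (pvT dg)).sum =
      ((dg.keys.filter (fun span => dp.contains span)).map
        (fun span => min (dp.getD span 0) (dg.getD span 0))).sum := by
    rw [pv_items_sum_to_keys dp hnp (pvT dg)
      (fun s => if dg.contains s then min (dp.getD s 0) (dg.getD s 0) else 0)
      (fun s => (hT s).symm), pv_sum_ite_filter]
    exact ((pv_perm_common dp dg hnp hng).map _).sum_eq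
  have hU : ∀ x, pvU dg x = x.2 - pvT dg x := by
    intro x; cases h : dg.get? x.1 <;> simp [pvU, pvT, h]
  have hUsum : (dp.items.map (pvU dg)).sum = dp.values.sum - (dp.items.map (pvT dg)).sum := by
    have h1 : dp.items.map (pvU dg) = dp.items.map (fun x => x.2 - pvT dg x) := by
      rw [funext hU]
    rw [h1, pv_sum_map_sub]
    rfl
  have hV : ∀ x, pvV dg x = (if dg.contains x.1 then dg.getD x.1 0 else 0) - pvT dg x := by
    intro x
    cases h : dg.get? x.1 with
    | none =>
      have hc : dg.contains x.1 = false := by rw [PySem.Dict.contains_eq_isSome_get?, h]; rfl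
      simp [pvV, pvT, h, hc]
    | some g =>
      have hc : dg.contains x.1 = true := by rw [PySem.Dict.contains_eq_isSome_get?, h]; rfl
      have hgd : dg.getD x.1 0 = g := PySem.Dict.getD_of_get?_eq_some dg 0 h
      simp [pvV, pvT, h, hc, hgd]
  have hVsum : (dp.items.map (pvV dg)).sum =
      ((dg.keys.filter (fun span => dp.contains span)).map (fun s => dg.getD s 0)).sum
        - (dp.items.map (pvT dg)).sum := by
    have h1 : dp.items.map (pvV dg) =
        dp.items.map (fun x => (if dg.contains x.1 then dg.getD x.1 0 else 0) - pvT dg x) := by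
      rw [funext hV]
    rw [h1, pv_sum_map_sub]
    congr 1
    rw [pv_items_sum_to_keys dp hnp (fun x => if dg.contains x.1 then dg.getD x.1 0 else 0)
      (fun s => if dg.contains s then dg.getD s 0 else 0) (fun s => rfl), pv_sum_ite_filter]
    exact ((pv_perm_common dp dg hnp hng).map _).sum_eq
  have hGold : dg.values.sum = (dg.keys.map (fun s => dg.getD s 0)).sum :=
    pv_items_sum_to_keys dg hng (fun x => x.2) (fun s => dg.getD s 0) (fun s => rfl)
  have hRest : ((dg.items.filter (fun y => !dp.contains y.1)).map (fun y => y.2)).sum =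
      ((dg.keys.filter (fun span => !dp.contains span)).map (fun s => dg.getD s 0)).sum := by
    have h1 : (dg.items.filter (fun y => !dp.contains y.1)).map (fun y => y.2) =
        (dg.items.filter (fun y => !dp.contains y.1)).map (fun y => dg.getD y.1 0) := by
      apply List.map_congr_left
      rintro ⟨k, v⟩ hy
      exact (PySem.Dict.getD_of_mem_items dg (List.mem_of_mem_filter hy) hng 0).symm
    have h2 : (dg.items.filter (fun y => !dp.contains y.1)).map (fun y => dg.getD y.1 0) =
        ((dg.items.filter (fun y => !dp.contains y.1)).map (·.1)).map (fun s => dg.getD s 0) := by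
      rw [List.map_map]; rfl
    have h3 : dg.keys = dg.items.map (·.1) := by simp only [PySem.Dict.keys]
    rw [h1, h2, pv_map_fst_filter dg.items (fun s => !dp.contains s), ← h3]
  have hSplit :
      ((dg.keys.filter (fun span => dp.contains span)).map (fun s => dg.getD s 0)).sum
        + ((dg.keys.filter (fun span => !dp.contains span)).map (fun s => dg.getD s 0)).sum
      = (dg.keys.map (fun s => dg.getD s 0)).sum :=
    pv_sum_filter_split dg.keys (fun span => dp.contains span) (fun s => dg.getD s 0)
  rw [pv_foldl_triple, pv_foldl_fn]
  refine Prod.ext ?_ (Prod.ext ?_ ?_)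
  · dsimp only
    rw [List.sum_append]
    simp [hTsum]
  · dsimp only
    rw [List.sum_append]
    simp [hUsum, hTsum]
  · dsimp only
    rw [List.sum_append]
    simp [hVsum, hTsum, hRest, hGold]
    omega
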